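-- pv_equiv track=rewrite | github.com/chintal/ebs-lib-mwtp | scaffold/analysis/process.py | get_sd
-- ===== SOURCE A (Python) =====
-- def get_sd(array):
--     sdarray = []
--     lpoint = 0
--     lfd = 0
--     for point in array:
--         fd = point - lpoint
--         sdarray.append(fd - lfd)
--         lpoint = point
--         lfd = fd
--     return sdarray
-- ===== SOURCE B (Python) =====
-- def get_sd(array):
--     fd = []
--     lpoint = 0
--     for point in array:
--         fd.append(point - lpoint)
--         lpoint = point
--     res = []
--     lfd = 0
--     for f in fd:
--         res.append(f - lfd)
--         lfd = f
--     return res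
-- ===== Notes on version B (the rewrite author's own statement) =====
-- stated objective: alternative
-- what changed: Replaces A's single fused loop carrying two running accumulators with two separate passes: first build the explicit first-difference list, then difference that list again.
import Mathlib
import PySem

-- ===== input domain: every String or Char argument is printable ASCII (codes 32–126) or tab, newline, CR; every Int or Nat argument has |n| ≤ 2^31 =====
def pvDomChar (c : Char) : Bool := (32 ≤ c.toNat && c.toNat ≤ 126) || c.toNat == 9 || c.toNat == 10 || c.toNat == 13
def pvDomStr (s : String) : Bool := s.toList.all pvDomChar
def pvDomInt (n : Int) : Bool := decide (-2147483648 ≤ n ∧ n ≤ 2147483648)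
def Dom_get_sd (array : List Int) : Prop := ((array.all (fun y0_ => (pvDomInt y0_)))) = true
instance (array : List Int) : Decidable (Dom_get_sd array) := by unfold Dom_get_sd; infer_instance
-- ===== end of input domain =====

-- B differs from A in decomposition only: two shaped passes via an explicit
-- first-difference list instead of A's fused loop with two accumulators.

-- ===== PORT A =====
-- A's single loop: state (sdarray, lpoint, lfd)
def get_sd (array : List Int) : List Int :=
  (array.foldl (fun (s : List Int × Int × Int) point =>
    let fd := point - s.2.1
    (s.1 ++ [fd - s.2.2], point, fd)) ([], 0, 0)).1

-- ===== PORT B =====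
-- B's first loop: append point - lpoint, carry lpoint
def get_sd_alt_pass (xs : List Int) (init : List Int × Int) : List Int × Int :=
  xs.foldl (fun (s : List Int × Int) p => (s.1 ++ [p - s.2], p)) init

def get_sd_alt (array : List Int) : List Int :=
  let fd := (get_sd_alt_pass array ([], 0)).1
  (get_sd_alt_pass fd ([], 0)).1

-- ===== PRECONDITION & SPEC =====
def Spec_get_sd (array : List Int) (out : List Int) : Prop := out = get_sd_alt array
instance (array : List Int) (out : List Int) : Decidable (Spec_get_sd array out) := by unfold Spec_get_sd; infer_instance

-- ===== CLAIM (what is proved, stated in full; the proofs are below) =====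
def Claim_equal_get_sd : Prop := ∀ (array : List Int), Dom_get_sd array → Spec_get_sd array (get_sd array)

-- ===== LEMMAS AND PROOFS =====

-- recursive characterisation of one differencing pass
def fdRec : List Int → Int → List Int
  | [], _ => []
  | p :: xs, l => (p - l) :: fdRec xs p

-- recursive characterisation of A's fused loop
def sdRec : List Int → Int → Int → List Int
  | [], _, _ => []
  | p :: xs, l, f => ((p - l) - f) :: sdRec xs p (p - l)

theorem pass_eq (xs : List Int) : ∀ acc l,
    (get_sd_alt_pass xs (acc, l)).1 = acc ++ fdRec xs l := by
  induction xs with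
  | nil => intro acc l; simp [get_sd_alt_pass, fdRec]
  | cons p xs ih =>
      intro acc l
      simp only [get_sd_alt_pass, List.foldl] at *
      rw [ih (acc ++ [p - l]) p]
      simp [fdRec]

theorem foldA_eq (xs : List Int) : ∀ acc l f,
    (xs.foldl (fun (s : List Int × Int × Int) point =>
      let fd := point - s.2.1
      (s.1 ++ [fd - s.2.2], point, fd)) (acc, l, f)).1 = acc ++ sdRec xs l f := by
  induction xs with
  | nil => intro acc l f; simp [sdRec]
  | cons p xs ih =>
      intro acc l f
      simp only [List.foldl]
      rw [ih (acc ++ [(p - l) - f]) p (p - l)]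
      simp [sdRec]

theorem sdRec_eq_fdRec (xs : List Int) : ∀ l f,
    sdRec xs l f = fdRec (fdRec xs l) f := by
  induction xs with
  | nil => intro l f; simp [sdRec, fdRec]
  | cons p xs ih => intro l f; simp [sdRec, fdRec, ih]

-- ===== VERDICT (by name: the statement is the Claim_ definition above) =====
theorem get_sd_spec : Claim_equal_get_sd := by
  intro array _
  unfold Spec_get_sd get_sd get_sd_alt
  rw [foldA_eq, pass_eq, pass_eq]
  simp [sdRec_eq_fdRec]
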